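-- pv_equiv track=rewrite | github.com/SamaelTONY/My_DNS_Rules | process_rules.py | is_valid_rule
-- ===== SOURCE A (Python) =====
-- RULE_PREFIX = "||"
--
-- RULE_SUFFIX = "^"
--
-- MIN_DOMAIN_LENGTH = 4
--
-- def extract_domain_from_rule(rule: str) -> str:
--     """从 AdGuard 规则中提取纯域名"""
--     domain = rule.strip()
--     if domain.startswith(RULE_PREFIX):
--         domain = domain[len(RULE_PREFIX):]
--     if domain.endswith(RULE_SUFFIX):
--         domain = domain[:-len(RULE_SUFFIX)]
--     return domain.split("/")[0].lower().strip()
--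
-- def is_valid_rule(rule: str) -> bool:
--     """验证规则格式是否有效（仅接受 ||domain^ 标准格式）"""
--     if not rule.startswith(RULE_PREFIX) or not rule.endswith(RULE_SUFFIX):
--         return False
--     domain = extract_domain_from_rule(rule)
--     if len(domain) < MIN_DOMAIN_LENGTH or "." not in domain:
--         return False
--     parts = domain.split(".")
--     if any(len(p) == 0 or p.startswith("-") or p.endswith("-") for p in parts):
--         return False
--     return True
-- ===== SOURCE B (Python) =====
-- RULE_PREFIX = "||"
--
-- RULE_SUFFIX = "^"
--
-- MIN_DOMAIN_LENGTH = 4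
--
--
-- def is_valid_rule(rule: str) -> bool:
--     """Single-pass scanner: cut the ||...^ core at the first '/', then walk the
--     domain once, tracking the previous character to judge label boundaries."""
--     if not (rule.startswith(RULE_PREFIX) and rule.endswith(RULE_SUFFIX)):
--         return False
--     core = rule[2:-1]
--     i = core.find("/")
--     if i != -1:
--         core = core[:i]
--     domain = core.lower().strip()
--     if len(domain) < MIN_DOMAIN_LENGTH:
--         return False
--     saw_dot = False
--     prev = "."  # sentinel: the position before the start behaves like a dot
--     for c in domain:
--         if c == ".":
--             if prev == "." or prev == "-":
--                 return False  # empty label or label ending with '-'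
--             saw_dot = True
--         elif c == "-" and prev == ".":
--             return False  # label starting with '-'
--         prev = c
--     if prev == "." or prev == "-":
--         return False  # trailing empty label or label ending with '-'
--     return saw_dot
-- ===== Notes on version B (the rewrite author's own statement) =====
-- stated objective: alternative
-- what changed: Replaces A's strip + conditional slices + two split() passes with an any() over the pieces by a direct [2:-1] core slice, a find-based cut at the first slash, and one single-pass character scan that tracks the previous character to judge empty labels and hyphen edges.
import Mathlib
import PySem

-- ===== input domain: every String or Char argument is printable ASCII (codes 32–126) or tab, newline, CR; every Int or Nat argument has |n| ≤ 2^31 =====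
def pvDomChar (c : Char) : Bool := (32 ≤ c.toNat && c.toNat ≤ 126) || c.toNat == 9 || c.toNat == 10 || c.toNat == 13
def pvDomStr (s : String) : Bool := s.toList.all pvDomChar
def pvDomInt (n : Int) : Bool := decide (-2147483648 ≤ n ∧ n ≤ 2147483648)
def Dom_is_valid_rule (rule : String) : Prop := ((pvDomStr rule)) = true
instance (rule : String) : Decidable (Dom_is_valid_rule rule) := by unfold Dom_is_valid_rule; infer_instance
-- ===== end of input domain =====

-- B rewrites A's multi-pass validation (strip, conditional slices, two split passes and an any())
-- as a [2:-1] slice, a find-based cut at the first slash, and one single-pass scan of the domain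
-- tracking the previous character (objective: alternative).

-- ===== PORT A =====
def extract_domain_from_rule (rule : String) : String :=
  let domain := PySem.Str.strip rule
  let domain := if PySem.Str.startswith domain "||" then PySem.Str.slice domain (some 2) none else domain
  let domain := if PySem.Str.endswith domain "^" then PySem.Str.slice domain none (some (-1)) else domain
  PySem.Str.strip (PySem.Str.lower (((PySem.Str.split? domain "/").getD []).headD ""))

def is_valid_rule (rule : String) : Bool :=
  if !PySem.Str.startswith rule "||" || !PySem.Str.endswith rule "^" then false
  else
    let domain := extract_domain_from_rule rule
    if PySem.Str.len domain < 4 || !PySem.Str.isIn "." domain then false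
    else
      let parts := (PySem.Str.split? domain ".").getD []
      if parts.any (fun p => PySem.Str.len p == 0 || PySem.Str.startswith p "-" || PySem.Str.endswith p "-") then false
      else true

-- ===== PORT B =====
-- the for-loop of Source B with its two early returns, as structural recursion on the characters
def pvCheckLabels : List Char → Char → Bool → Bool
  | [], prev, sawDot => !(prev == '.' || prev == '-') && sawDot
  | c :: rest, prev, sawDot =>
    if c == '.' then
      if prev == '.' || prev == '-' then false else pvCheckLabels rest c true
    else if c == '-' && prev == '.' then false
    else pvCheckLabels rest c sawDot

def is_valid_rule_alt (rule : String) : Bool :=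
  if !(PySem.Str.startswith rule "||" && PySem.Str.endswith rule "^") then false
  else
    let core := PySem.Str.slice rule (some 2) (some (-1))
    let i := PySem.Str.find core "/"
    let core := if i != -1 then PySem.Str.slice core none (some i) else core
    let domain := PySem.Str.strip (PySem.Str.lower core)
    if PySem.Str.len domain < 4 then false
    else pvCheckLabels domain.toList '.' false

-- ===== PRECONDITION & SPEC =====
def Spec_is_valid_rule (rule : String) (out : Bool) : Prop := out = is_valid_rule_alt rule
instance (rule : String) (out : Bool) : Decidable (Spec_is_valid_rule rule out) := by unfold Spec_is_valid_rule; infer_instance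

-- ===== CLAIM (what is proved, stated in full; the proofs are below) =====
def Claim_equal_is_valid_rule : Prop := ∀ (rule : String), Dom_is_valid_rule rule → Spec_is_valid_rule rule (is_valid_rule rule)

-- ===== LEMMAS AND PROOFS =====

-- split on a single character, directly by structural recursion
def pvSplitc (c : Char) : List Char → List (List Char)
  | [] => [[]]
  | a :: rest =>
    if a = c then [] :: pvSplitc c rest
    else match pvSplitc c rest with
      | [] => [[a]]
      | p :: ps => (a :: p) :: ps

-- the first piece of pvSplitc, i.e. take-until-first-occurrence
def pvCut (c : Char) : List Char → List Char
  | [] => []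
  | a :: rest => if a = c then [] else a :: pvCut c rest

theorem pvSplitc_ne_nil (c : Char) (l : List Char) : pvSplitc c l ≠ [] := by
  induction l with
  | nil => simp [pvSplitc]
  | cons a rest ih =>
    simp only [pvSplitc]
    split
    · simp
    · cases h : pvSplitc c rest with
      | nil => simp
      | cons p ps => simp

theorem pvSplitc_head (c : Char) (l : List Char) : (pvSplitc c l).headD [] = pvCut c l := by
  induction l with
  | nil => simp [pvSplitc, pvCut]
  | cons a rest ih =>
    simp only [pvSplitc, pvCut]
    split
    · simp
    · cases h : pvSplitc c rest with
      | nil => exact absurd h (pvSplitc_ne_nil c rest)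
      | cons p ps => simp_all

def pvPrepend (pre : List Char) : List (List Char) → List (List Char)
  | [] => [pre]
  | p :: ps => (pre ++ p) :: ps

theorem go_zero (sep l cur : List Char) (acc : List (List Char)) :
    PySem.Chars.splitOn.go sep 0 l cur acc = ((cur.reverse ++ l) :: acc).reverse := by
  rw [PySem.Chars.splitOn.go.eq_def]

theorem go_succ_nil (sep : List Char) (n : Nat) (cur : List Char) (acc : List (List Char)) :
    PySem.Chars.splitOn.go sep (n + 1) [] cur acc = (cur.reverse :: acc).reverse := by
  rw [PySem.Chars.splitOn.go.eq_def]

theorem go_succ_cons (sep : List Char) (n : Nat) (a : Char) (rest cur : List Char) (acc : List (List Char)) :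
    PySem.Chars.splitOn.go sep (n + 1) (a :: rest) cur acc =
      if sep.isPrefixOf (a :: rest) = true then
        PySem.Chars.splitOn.go sep n (List.drop sep.length (a :: rest)) [] (cur.reverse :: acc)
      else PySem.Chars.splitOn.go sep n rest (a :: cur) acc := by
  rw [PySem.Chars.splitOn.go.eq_def]

theorem splitOn_go_acc (sep : List Char) : ∀ (fuel : Nat) (l cur : List Char) (acc : List (List Char)),
    PySem.Chars.splitOn.go sep fuel l cur acc = acc.reverse ++ PySem.Chars.splitOn.go sep fuel l cur [] := by
  intro fuel
  induction fuel with
  | zero =>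
    intro l cur acc
    rw [go_zero, go_zero]
    simp
  | succ n ih =>
    intro l cur acc
    cases l with
    | nil =>
      rw [go_succ_nil, go_succ_nil]
      simp
    | cons a rest =>
      rw [go_succ_cons, go_succ_cons]
      split
      · rw [ih (List.drop sep.length (a :: rest)) [] (cur.reverse :: acc),
            ih (List.drop sep.length (a :: rest)) [] [cur.reverse]]
        simp
      · exact ih rest (a :: cur) acc

theorem splitOn_go_single (c : Char) : ∀ (fuel : Nat) (l cur : List Char), l.length < fuel →
    PySem.Chars.splitOn.go [c] fuel l cur [] = pvPrepend cur.reverse (pvSplitc c l) := by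
  intro fuel
  induction fuel with
  | zero => intro l cur h; omega
  | succ n ih =>
    intro l cur h
    cases l with
    | nil =>
      rw [go_succ_nil]
      simp [pvSplitc, pvPrepend]
    | cons a rest =>
      rw [go_succ_cons]
      simp only [List.isPrefixOf, Bool.and_true]
      by_cases hac : c = a
      · subst hac
        rw [if_pos (by simp)]
        have hd : List.drop ([c].length) (c :: rest) = rest := by simp
        rw [hd, splitOn_go_acc]
        rw [ih rest [] (by simpa using Nat.lt_of_succ_lt_succ h)]
        simp only [List.reverse_cons, List.reverse_nil, List.nil_append]
        cases hs : pvSplitc c rest with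
        | nil => exact absurd hs (pvSplitc_ne_nil c rest)
        | cons p ps => simp [pvSplitc, pvPrepend, hs]
      · have hba : (c == a) = false := by simp [hac]
        rw [hba]
        simp only [Bool.false_eq_true, if_false]
        rw [ih rest (a :: cur) (by simpa using Nat.lt_of_succ_lt_succ h)]
        have hne : a = c → False := fun h' => hac h'.symm
        cases hs : pvSplitc c rest with
        | nil => exact absurd hs (pvSplitc_ne_nil c rest)
        | cons p ps =>
          simp only [pvSplitc, hs, if_neg hne, pvPrepend]
          simp

-- splitOn with a one-character separator is pvSplitc
theorem splitOn_single (c : Char) (l : List Char) :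
    PySem.Chars.splitOn l [c] = pvSplitc c l := by
  show PySem.Chars.splitOn.go [c] (l.length + 1) l [] [] = _
  rw [splitOn_go_single c (l.length + 1) l [] (by omega)]
  cases hs : pvSplitc c l with
  | nil => exact absurd hs (pvSplitc_ne_nil c l)
  | cons p ps => simp [pvPrepend]

theorem findgo_nil (sub : List Char) (k : Nat) :
    PySem.Chars.find.go sub [] k = if sub.isEmpty then (k : Int) else -1 := by
  rw [PySem.Chars.find.go.eq_def]

theorem findgo_cons (sub : List Char) (a : Char) (rest : List Char) (k : Nat) :
    PySem.Chars.find.go sub (a :: rest) k =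
      if sub.isPrefixOf (a :: rest) then (k : Int) else PySem.Chars.find.go sub rest (k + 1) := by
  rw [PySem.Chars.find.go.eq_def]

theorem findgo_single (c : Char) : ∀ (l : List Char) (k : Nat),
    PySem.Chars.find.go [c] l k = if c ∈ l then ((k + l.idxOf c : Nat) : Int) else -1 := by
  intro l
  induction l with
  | nil => intro k; rw [findgo_nil]; simp
  | cons a rest ih =>
    intro k
    rw [findgo_cons]
    simp only [List.isPrefixOf, Bool.and_true]
    by_cases hac : c = a
    · subst hac
      simp [List.idxOf_cons]
    · have hac' : a ≠ c := fun h => hac h.symm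
      have hba : (c == a) = false := by simp [hac]
      have hab : (a == c) = false := by simp [hac']
      rw [hba]
      simp only [Bool.false_eq_true, if_false, ih (k + 1)]
      by_cases hm : c ∈ rest
      · have hmem : c ∈ a :: rest := List.mem_cons_of_mem a hm
        rw [if_pos hm, if_pos hmem, List.idxOf_cons, hab]
        simp only [cond_false]
        push_cast
        ring
      · have hmem : ¬ c ∈ a :: rest := by
          intro h'
          rcases List.mem_cons.mp h' with h'' | h''
          · exact hac h''
          · exact hm h''
        rw [if_neg hm, if_neg hmem]

theorem find_single (c : Char) (l : List Char) :
    PySem.Chars.find l [c] = if c ∈ l then (l.idxOf c : Int) else -1 := by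
  show PySem.Chars.find.go [c] l 0 = _
  rw [findgo_single]
  simp

theorem pvCut_of_not_mem (c : Char) (l : List Char) (h : c ∉ l) : pvCut c l = l := by
  induction l with
  | nil => rfl
  | cons a rest ih =>
    simp only [List.mem_cons, not_or] at h
    have ha : a ≠ c := fun h' => h.1 h'.symm
    simp [pvCut, ha, ih h.2]

theorem take_idxOf_eq_pvCut (c : Char) (l : List Char) (h : c ∈ l) :
    l.take (l.idxOf c) = pvCut c l := by
  induction l with
  | nil => cases h
  | cons a rest ih =>
    by_cases hac : a = c
    · subst hac
      simp [List.idxOf_cons, pvCut]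
    · have hab : (a == c) = false := by simp [hac]
      have hm : c ∈ rest := by
        rcases List.mem_cons.mp h with h' | h'
        · exact absurd h'.symm hac
        · exact h'
      simp [List.idxOf_cons, hab, pvCut, hac, ih hm]

-- B's find-based cut is pvCut
theorem find_cut (c : Char) (l : List Char) :
    (if PySem.Chars.find l [c] != -1 then PySem.List.slice l none (some (PySem.Chars.find l [c])) else l)
      = pvCut c l := by
  rw [find_single]
  by_cases h : c ∈ l
  · simp only [if_pos h]
    have hne : ((l.idxOf c : Int) != -1) = true := by
      simp only [bne_iff_ne, ne_eq]
      omega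
    rw [if_pos hne, PySem.List.slice_to l (by positivity)]
    simpa using take_idxOf_eq_pvCut c l h
  · simp [h, pvCut_of_not_mem c l h]

-- strip is the identity on a ||…^ rule
theorem strip_pipe_caret (s : List Char) (h1 : ['|', '|'] <+: s) (h2 : ['^'] <:+ s) :
    PySem.Chars.strip s = s := by
  obtain ⟨t, ht⟩ := h1
  obtain ⟨u, hu⟩ := h2
  have hsp : PySem.Chars.isspace '|' = false := by decide
  have hsc : PySem.Chars.isspace '^' = false := by decide
  have hl : PySem.Chars.lstrip s = s := by
    rw [← ht]
    simp [PySem.Chars.lstrip, List.dropWhile_cons, hsp]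
  have hr : PySem.Chars.rstrip s = s := by
    rw [← hu]
    simp [PySem.Chars.rstrip, List.dropWhile_cons, hsc]
  rw [PySem.Chars.strip, hl, hr]

def pvGood (p : List Char) : Bool :=
  !(decide (p.length = 0) || PySem.Chars.startswith p ['-'] || PySem.Chars.endswith p ['-'])

def pvContOK (p : List Char) : Bool := !(PySem.Chars.endswith p ['-'])
def pvHyOK (p : List Char) : Bool := !(decide (p = [])) && !(PySem.Chars.endswith p ['-'])

theorem endswith_cons (x : Char) (p : List Char) (hp : p ≠ []) :
    PySem.Chars.endswith (x :: p) ['-'] = PySem.Chars.endswith p ['-'] := by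
  cases hr : p.reverse with
  | nil => exact absurd (by simpa using hr) hp
  | cons h tr =>
    have hxr : (x :: p).reverse = h :: (tr ++ [x]) := by
      rw [List.reverse_cons, hr]; simp
    simp [PySem.Chars.endswith, List.isSuffixOf, hxr, hr, List.isPrefixOf]

theorem contOK_hyphen (p : List Char) : pvContOK ('-' :: p) = pvHyOK p := by
  cases p with
  | nil => decide
  | cons y q => simp [pvContOK, pvHyOK, endswith_cons '-' (y :: q) (by simp)]

theorem hyOK_hyphen (p : List Char) : pvHyOK ('-' :: p) = pvHyOK p := by
  cases p with
  | nil => decide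
  | cons y q => simp [pvHyOK, endswith_cons '-' (y :: q) (by simp)]

theorem contOK_cons (x : Char) (p : List Char) (hx : x ≠ '-') : pvContOK (x :: p) = pvContOK p := by
  cases p with
  | nil =>
    have h1 : ('-' == x) = false := by simp [(Ne.symm hx : '-' ≠ x)]
    simp [pvContOK, PySem.Chars.endswith, List.isSuffixOf, List.isPrefixOf, h1]
  | cons y q => simp [pvContOK, endswith_cons x (y :: q) (by simp)]

theorem hyOK_cons (x : Char) (p : List Char) (hx : x ≠ '-') : pvHyOK (x :: p) = pvContOK p := by
  cases p with
  | nil =>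
    have h1 : ('-' == x) = false := by simp [(Ne.symm hx : '-' ≠ x)]
    simp [pvHyOK, pvContOK, PySem.Chars.endswith, List.isSuffixOf, List.isPrefixOf, h1]
  | cons y q =>
    simp [pvHyOK, pvContOK, endswith_cons x (y :: q) (by simp)]

theorem pvGood_hyphen (p : List Char) : pvGood ('-' :: p) = false := by
  simp [pvGood, PySem.Chars.startswith, List.isPrefixOf]

theorem pvGood_cons (x : Char) (p : List Char) (hx : x ≠ '-') : pvGood (x :: p) = pvContOK p := by
  have h1 : ('-' == x) = false := by simp [(Ne.symm hx : '-' ≠ x)]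
  rw [← contOK_cons x p hx]
  simp [pvGood, pvContOK, PySem.Chars.startswith, List.isPrefixOf, h1]

theorem scan_inv : ∀ (l : List Char) (d : Bool),
    (pvCheckLabels l '.' d = ((d || l.contains '.') && (pvSplitc '.' l).all pvGood))
  ∧ (∀ prev, prev ≠ '.' → prev ≠ '-' →
      pvCheckLabels l prev d
        = ((d || l.contains '.') && (pvContOK ((pvSplitc '.' l).headD []) && ((pvSplitc '.' l).tail).all pvGood)))
  ∧ (pvCheckLabels l '-' d
        = ((d || l.contains '.') && (pvHyOK ((pvSplitc '.' l).headD []) && ((pvSplitc '.' l).tail).all pvGood))) := by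
  intro l
  induction l with
  | nil =>
    intro d
    refine ⟨by simp [pvCheckLabels, pvSplitc, pvGood], ?_, by simp [pvCheckLabels, pvSplitc, pvHyOK]⟩
    intro prev h1 h2
    have b1 : (prev == '.') = false := by simp [h1]
    have b2 : (prev == '-') = false := by simp [h2]
    simp [pvCheckLabels, pvSplitc, b1, b2, pvContOK, PySem.Chars.endswith, List.isSuffixOf, List.isPrefixOf]
  | cons c rest ih =>
    intro d
    obtain ⟨p, ps, hs⟩ : ∃ p ps, pvSplitc '.' rest = p :: ps := by
      cases h' : pvSplitc '.' rest with
      | nil => exact absurd h' (pvSplitc_ne_nil '.' rest)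
      | cons p ps => exact ⟨p, ps, rfl⟩
    have cnil : pvContOK [] = true := by decide
    have hynil : pvHyOK [] = false := by decide
    by_cases hdot : c = '.'
    · subst hdot
      refine ⟨?_, ?_, ?_⟩
      · simp [pvCheckLabels, pvSplitc, hs, pvGood]
      · intro prev h1 h2
        have b1 : (prev == '.') = false := by simp [h1]
        have b2 : (prev == '-') = false := by simp [h2]
        have := (ih true).1
        simp only [pvCheckLabels, beq_self_eq_true, if_pos, b1, b2, Bool.or_self,
          Bool.false_eq_true, if_false, this, hs]
        simp [pvSplitc, hs, cnil]
      · simp [pvCheckLabels, pvSplitc, hs, pvHyOK]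
    · by_cases hhy : c = '-'
      · subst hhy
        have bcd : (('-' : Char) == '.') = false := by decide
        refine ⟨?_, ?_, ?_⟩
        · simp [pvCheckLabels, pvSplitc, hs, pvGood_hyphen, PySem.Chars.startswith, List.isPrefixOf]
        · intro prev h1 h2
          have b1 : (prev == '.') = false := by simp [h1]
          have := (ih d).2.2
          simp only [pvCheckLabels, bcd, Bool.false_eq_true, if_false, beq_self_eq_true,
            Bool.true_and, b1, Bool.and_false, this, hs]
          simp [pvSplitc, hs, bcd, contOK_hyphen]
        · have bdd : (('-' : Char) == '.') = false := by decide
          have := (ih d).2.2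
          simp only [pvCheckLabels, bdd, Bool.false_eq_true, if_false, beq_self_eq_true,
            Bool.true_and, Bool.and_false, this, hs]
          simp [pvSplitc, hs, bdd, hyOK_hyphen]
      · have hdot2 : ('.' : Char) = c ↔ False := ⟨fun h => hdot h.symm, False.elim⟩
        have bcd : (c == '.') = false := by simp [hdot]
        have bch : (c == '-') = false := by simp [hhy]
        have hmid := (ih d).2.1 c hdot hhy
        refine ⟨?_, ?_, ?_⟩
        · simp only [pvCheckLabels, bcd, Bool.false_eq_true, if_false, Bool.false_and, hmid, hs]
          simp [pvSplitc, hs, bcd, hdot, pvGood_cons c p hhy, contOK_cons c p hhy, cnil, hynil, hdot2, hhy, hdot2, hhy,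
            Bool.and_assoc, Bool.and_left_comm, Bool.and_comm]
        · intro prev h1 h2
          simp only [pvCheckLabels, bcd, bch, Bool.false_eq_true, if_false, Bool.false_and, hmid, hs]
          simp [pvSplitc, hs, bcd, hdot, contOK_cons c p hhy, cnil, hynil, hdot2, hhy,
            Bool.and_assoc, Bool.and_left_comm, Bool.and_comm]
        · simp only [pvCheckLabels, bcd, bch, Bool.false_eq_true, if_false, Bool.false_and, hmid, hs]
          simp [pvSplitc, hs, bcd, hdot, hyOK_cons c p hhy, cnil, hynil, hdot2, hhy,
            Bool.and_assoc, Bool.and_left_comm, Bool.and_comm]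

-- the single-pass scan computes exactly "contains a dot and every pvSplitc piece is good"
theorem checkLabels_eq (l : List Char) :
    pvCheckLabels l '.' false = (l.contains '.' && (pvSplitc '.' l).all pvGood) := by
  simpa using (scan_inv l false).1


theorem isIn_single (c : Char) (l : List Char) : PySem.Chars.isIn [c] l = l.contains c := by
  by_cases h : c ∈ l
  · have hinf : [c] <:+: l := by
      obtain ⟨s, t, rfl⟩ := List.append_of_mem h
      exact ⟨s, t, by simp⟩
    rw [(PySem.Chars.isIn_iff_infix [c] l).mpr hinf]
    simp [h]
  · have h2 : PySem.Chars.isIn [c] l = false := by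
      rw [PySem.Chars.isIn_eq_false_iff]
      intro hin
      exact h (hin.subset (by simp))
    rw [h2]
    simp [h]

theorem headD_toList (ps : List String) : (ps.headD "").toList = (ps.map String.toList).headD [] := by
  cases ps <;> simp

theorem split?_single (x sep : String) (hsep : sep.toList ≠ []) :
    ∃ ps, PySem.Str.split? x sep = some ps ∧
      ps.map String.toList = PySem.Chars.splitOn x.toList sep.toList := by
  have h := PySem.Str.split?_map x sep
  rw [PySem.Chars.split?, if_neg (by simpa [List.isEmpty_iff] using hsep)] at h
  cases hx : PySem.Str.split? x sep with
  | none => rw [hx] at h; simp at h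
  | some ps =>
    rw [hx] at h
    simp only [Option.map_some, Option.some.injEq] at h
    exact ⟨ps, rfl, h⟩

theorem slice_two_negone {α : Type} (l : List α) (h : 3 ≤ l.length) :
    PySem.List.slice l (some 2) (some (-1)) = (l.drop 2).dropLast := by
  rw [PySem.List.slice.eq_4]
  have h1 : PySem.List.clampIdx l.length (-1) = l.length - 1 := by
    unfold PySem.List.clampIdx
    rw [if_pos (by norm_num), if_neg (by push_cast; omega)]
    omega
  have h2 : PySem.List.clampIdx l.length 2 = 2 := by
    unfold PySem.List.clampIdx
    rw [if_neg (by norm_num)]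
    have : (2 : Int).toNat = 2 := rfl
    omega
  rw [h1, h2, List.dropLast_eq_take]
  congr 1
  simp
  omega

theorem bad_eq_not_good (p : String) :
    (PySem.Str.len p == 0 || PySem.Str.startswith p "-" || PySem.Str.endswith p "-")
      = !(pvGood p.toList) := by
  have c1 : (PySem.Str.len p == 0) = decide (p.toList.length = 0) := by
    rw [PySem.Str.len_eq]
    by_cases hz : p.toList.length = 0
    · rw [hz]
      decide
    · have hne : (p.toList.length : Int) ≠ 0 := by exact_mod_cast hz
      rw [decide_eq_false hz]
      simpa using hne
  have c2 : PySem.Str.startswith p "-" = PySem.Chars.startswith p.toList ['-'] := by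
    rw [PySem.Str.startswith_eq, show "-".toList = ['-'] from by decide]
  have c3 : PySem.Str.endswith p "-" = PySem.Chars.endswith p.toList ['-'] := by
    rw [PySem.Str.endswith_eq, show "-".toList = ['-'] from by decide]
  rw [c1, c2, c3, pvGood, Bool.not_not]

theorem any_not_all (ps : List String) :
    (ps.any fun p => PySem.Str.len p == 0 || PySem.Str.startswith p "-" || PySem.Str.endswith p "-")
      = !((ps.map String.toList).all pvGood) := by
  induction ps with
  | nil => simp
  | cons q qs ih =>
    rw [List.any_cons, bad_eq_not_good, ih, List.map_cons, List.all_cons]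
    cases pvGood q.toList <;> simp

-- both tails, as a function of the character list of the domain string
set_option maxHeartbeats 1000000 in
theorem tailA_eval (x : String) :
    (if PySem.Str.len x < 4 || !PySem.Str.isIn "." x then false
     else if ((PySem.Str.split? x ".").getD []).any
         (fun p => PySem.Str.len p == 0 || PySem.Str.startswith p "-" || PySem.Str.endswith p "-") then false
     else true)
    = ((!decide ((x.toList.length : Int) < 4))
        && (x.toList.contains '.' && (pvSplitc '.' x.toList).all pvGood)) := by
  obtain ⟨ps, hps, hmap⟩ := split?_single x "." (by decide)
  have hisin : PySem.Str.isIn "." x = x.toList.contains '.' := by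
    rw [PySem.Str.isIn_eq, show ".".toList = ['.'] from by decide]
    exact isIn_single '.' x.toList
  have hsp : PySem.Chars.splitOn x.toList (String.toList ".") = pvSplitc '.' x.toList := by
    rw [show String.toList "." = ['.'] from by decide, splitOn_single]
  by_cases h : PySem.Str.len x < 4
  · have h' : ((x.toList.length : Int) < 4) := by rw [PySem.Str.len_eq] at h; exact h
    rw [decide_eq_true h, Bool.true_or, if_pos rfl, decide_eq_true h', Bool.not_true,
      Bool.false_and]
  · have h' : ¬ ((x.toList.length : Int) < 4) := by rw [PySem.Str.len_eq] at h; exact h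
    rw [decide_eq_false h, Bool.false_or, hisin, decide_eq_false h', Bool.not_false, Bool.true_and]
    by_cases hdot : x.toList.contains '.' = true
    · rw [hdot, Bool.not_true, if_neg (by simp)]
      simp only [hps, Option.getD_some, any_not_all, hmap, hsp, Bool.true_and]
      cases hall : (pvSplitc '.' x.toList).all pvGood <;> simp [hall]
    · have hdot' : x.toList.contains '.' = false := by simpa using hdot
      rw [hdot', Bool.not_false, if_pos rfl, Bool.false_and]

theorem tailB_eval (x : String) :
    (if PySem.Str.len x < 4 then false else pvCheckLabels x.toList '.' false)
    = ((!decide ((x.toList.length : Int) < 4))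
        && (x.toList.contains '.' && (pvSplitc '.' x.toList).all pvGood)) := by
  by_cases h : PySem.Str.len x < 4
  · have h' : ((x.toList.length : Int) < 4) := by rw [PySem.Str.len_eq] at h; exact h
    rw [if_pos h, decide_eq_true h', Bool.not_true, Bool.false_and]
  · have h' : ¬ ((x.toList.length : Int) < 4) := by rw [PySem.Str.len_eq] at h; exact h
    rw [if_neg h, checkLabels_eq, decide_eq_false h', Bool.not_false, Bool.true_and]

-- ===== VERDICT (by name: the statement is the Claim_ definition above) =====
set_option maxHeartbeats 1000000 in
theorem is_valid_rule_spec : Claim_equal_is_valid_rule := by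
  unfold Claim_equal_is_valid_rule Spec_is_valid_rule
  intro rule _
  by_cases h1 : PySem.Str.startswith rule "||" = true
  · by_cases h2 : PySem.Str.endswith rule "^" = true
    · -- main case: the rule is ||…^
      obtain ⟨t, ht⟩ : ['|', '|'] <+: rule.toList := by
        have h := h1
        rw [PySem.Str.startswith_eq] at h
        exact (PySem.Chars.startswith_iff _ _).mp h
      have hsuf : ['^'] <:+ rule.toList := by
        have h := h2
        rw [PySem.Str.endswith_eq] at h
        exact (PySem.Chars.endswith_iff _ _).mp h
      have htne : t ≠ [] := by
        intro h0
        rw [h0] at ht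
        obtain ⟨u, hu⟩ := hsuf
        rw [← ht] at hu
        have := congrArg List.getLast? hu
        simp at this
      have htl : t.dropLast ++ ['^'] = t := by
        obtain ⟨u, hu⟩ := hsuf
        rw [← ht] at hu
        have hg := congrArg List.getLast? hu
        rw [List.getLast?_concat] at hg
        have hgt : t.getLast? = some '^' := by
          cases t with
          | nil => exact absurd rfl htne
          | cons a s =>
            rw [List.getLast?_append] at hg
            cases hl : (a :: s : List Char).getLast? with
            | none => simp at hl
            | some b =>
              have hb : b = '^' := by
                rw [hl] at hg
                simp at hg
                exact hg.symm
              rw [hb]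
        obtain ⟨ys, hys⟩ := List.getLast?_eq_some_iff.mp hgt
        rw [hys]
        simp
      have hlen3 : 3 ≤ rule.toList.length := by
        rw [← ht]
        have hpos : 0 < t.length := List.length_pos_iff.mpr htne
        simp only [List.length_append, List.length_cons, List.length_nil]
        omega
      have hstrip : PySem.Chars.strip rule.toList = rule.toList :=
        strip_pipe_caret _ ⟨t, ht⟩ hsuf
      -- A's intermediate strings
      have hsw : PySem.Str.startswith (PySem.Str.strip rule) "||" = true := by
        rw [PySem.Str.startswith_eq, PySem.Str.toList_strip, hstrip, ← PySem.Str.startswith_eq]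
        exact h1
      have hd1 : (PySem.Str.slice (PySem.Str.strip rule) (some 2) none).toList = t := by
        rw [PySem.Str.toList_slice, PySem.Str.toList_strip, hstrip, PySem.Chars.slice_eq_listSlice,
          PySem.List.slice_from rule.toList (by norm_num : (0 : Int) ≤ 2), ← ht]
        rfl
      have hew : PySem.Str.endswith (PySem.Str.slice (PySem.Str.strip rule) (some 2) none) "^" = true := by
        rw [PySem.Str.endswith_eq, hd1]
        exact (PySem.Chars.endswith_iff _ _).mpr ⟨t.dropLast, htl⟩
      have hd2 : (PySem.Str.slice (PySem.Str.slice (PySem.Str.strip rule) (some 2) none) none (some (-1))).toList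
          = t.dropLast := by
        rw [PySem.Str.slice_to_neg_one, hd1]
      obtain ⟨ps, hps, hmap⟩ := split?_single
        (PySem.Str.slice (PySem.Str.slice (PySem.Str.strip rule) (some 2) none) none (some (-1))) "/"
        (by decide)
      have hhead : (((PySem.Str.split?
            (PySem.Str.slice (PySem.Str.slice (PySem.Str.strip rule) (some 2) none) none (some (-1)))
            "/").getD []).headD "").toList = pvCut '/' t.dropLast := by
        rw [hps]
        simp only [Option.getD_some]
        rw [headD_toList, hmap, hd2, show String.toList "/" = ['/'] from rfl, splitOn_single,
          pvSplitc_head]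
      have hdomA : (extract_domain_from_rule rule).toList
          = PySem.Chars.strip (PySem.Chars.lower (pvCut '/' t.dropLast)) := by
        unfold extract_domain_from_rule
        simp only [hsw, hew, if_true]
        rw [PySem.Str.toList_strip, PySem.Str.toList_lower, hhead]
      -- B's core string
      have hcore : (PySem.Str.slice rule (some 2) (some (-1))).toList = t.dropLast := by
        rw [PySem.Str.toList_slice, PySem.Chars.slice_eq_listSlice, slice_two_negone _ hlen3, ← ht]
        rfl
      have hfind : PySem.Str.find (PySem.Str.slice rule (some 2) (some (-1))) "/"
          = PySem.Chars.find t.dropLast ['/'] := by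
        rw [PySem.Str.find_eq, hcore]
        exact congrArg (PySem.Chars.find t.dropLast) (by decide)
      have hcut : (if (PySem.Str.find (PySem.Str.slice rule (some 2) (some (-1))) "/" != -1)
            then PySem.Str.slice (PySem.Str.slice rule (some 2) (some (-1))) none
              (some (PySem.Str.find (PySem.Str.slice rule (some 2) (some (-1))) "/"))
            else PySem.Str.slice rule (some 2) (some (-1))).toList = pvCut '/' t.dropLast := by
        rw [apply_ite String.toList]
        rw [hfind]
        rw [PySem.Str.toList_slice, PySem.Chars.slice_eq_listSlice, hcore]
        exact find_cut '/' t.dropLast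
      -- reduce both programs to their tails
      have hguardA : (!PySem.Str.startswith rule "||" || !PySem.Str.endswith rule "^") ≠ true := by
        rw [h1, h2]
        simp
      have hguardB : (!(PySem.Str.startswith rule "||" && PySem.Str.endswith rule "^")) ≠ true := by
        rw [h1, h2]
        simp
      simp only [is_valid_rule, is_valid_rule_alt]
      rw [if_neg hguardA, if_neg hguardB, tailA_eval, tailB_eval, hdomA,
        PySem.Str.toList_strip, PySem.Str.toList_lower, hcut]
    · have h2' : PySem.Str.endswith rule "^" = false := by simpa using h2
      unfold is_valid_rule is_valid_rule_alt
      rw [if_pos (by rw [h1, h2']; rfl), if_pos (by rw [h1, h2']; rfl)]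
  · have h1' : PySem.Str.startswith rule "||" = false := by simpa using h1
    unfold is_valid_rule is_valid_rule_alt
    rw [if_pos (by rw [h1']; rfl), if_pos (by rw [h1']; rfl)]
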